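-- pv_equiv track=rewrite | github.com/syseitz/predTED | utils/features.py | compute_depth_profile
-- ===== SOURCE A (Python) =====
-- from typing import List, Tuple, Dict
--
-- def compute_depth_profile(structure: str) -> List[int]:
--     depth = 0
--     profile = []
--     for c in structure:
--         if c == '(':
--             depth += 1
--         elif c == ')':
--             depth -= 1
--         profile.append(depth)
--     return profile
-- ===== SOURCE B (Python) =====
-- def _bisect_right(xs, x):
--     # number of elements <= x in the ascending list xs, by binary search
--     lo, hi = 0, len(xs)
--     while lo < hi:
--         mid = (lo + hi) // 2
--         if xs[mid] <= x:
--             lo = mid + 1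
--         else:
--             hi = mid
--     return lo
--
-- def compute_depth_profile(structure: str):
--     opens = [i for i, c in enumerate(structure) if c == '(']
--     closes = [i for i, c in enumerate(structure) if c == ')']
--     return [_bisect_right(opens, i) - _bisect_right(closes, i)
--             for i in range(len(structure))]
-- ===== Notes on version B (the rewrite author's own statement) =====
-- stated objective: alternative
-- what changed: Instead of a running counter, B builds sorted index lists of the opening-bracket and closing-bracket positions and computes each depth as a difference of binary-searched prefix counts over those position lists.
import Mathlib
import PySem

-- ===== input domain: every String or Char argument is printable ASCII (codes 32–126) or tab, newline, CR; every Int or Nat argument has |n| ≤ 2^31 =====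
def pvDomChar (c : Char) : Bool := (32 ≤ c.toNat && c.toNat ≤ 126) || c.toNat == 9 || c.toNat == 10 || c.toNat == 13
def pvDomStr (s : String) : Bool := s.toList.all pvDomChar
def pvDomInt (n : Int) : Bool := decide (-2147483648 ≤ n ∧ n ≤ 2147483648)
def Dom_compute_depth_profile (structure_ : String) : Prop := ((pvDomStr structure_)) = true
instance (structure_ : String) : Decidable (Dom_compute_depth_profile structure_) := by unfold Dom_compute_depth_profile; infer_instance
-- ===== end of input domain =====

-- B replaces A's running depth counter by position-index lists for '(' / ')' plus per-index binary-searched prefix counts; objective: alternative (same result, different algorithm).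


-- ===== PORT A =====
-- loop over characters keeping (depth, profile); profile appended at the back, as in Python
def compute_depth_profile (structure_ : String) : List Int :=
  (structure_.toList.foldl
    (fun (st : Int × List Int) c =>
      let depth := if c = '(' then st.1 + 1 else if c = ')' then st.1 - 1 else st.1
      (depth, st.2 ++ [depth]))
    (0, [])).2

-- ===== PORT B =====
-- [i for i, c in enumerate(structure) if c == target], carrying the running enumerate index k
def pvPositions (target : Char) (k : Nat) : List Char → List Int
  | [] => []
  | c :: cs => if c = target then (k : Int) :: pvPositions target (k+1) cs
               else pvPositions target (k+1) cs

-- the while-loop of _bisect_right; getD 0 is exact here: lo < hi ≤ len keeps mid in range, so xs[mid] never raises in Python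
def pvBisectLoop (xs : List Int) (x : Int) (lo hi : Nat) : Nat :=
  if lo < hi then
    let mid := (lo + hi) / 2
    if xs.getD mid 0 ≤ x then pvBisectLoop xs x (mid+1) hi else pvBisectLoop xs x lo mid
  else lo
termination_by hi - lo
decreasing_by all_goals omega

def pvBisectRight (xs : List Int) (x : Int) : Nat := pvBisectLoop xs x 0 xs.length

def compute_depth_profile_alt (structure_ : String) : List Int :=
  let l := structure_.toList
  let opens := pvPositions '(' 0 l
  let closes := pvPositions ')' 0 l
  (List.range l.length).map (fun (i : Nat) =>
    ((pvBisectRight opens (i : Int) : Nat) : Int) - ((pvBisectRight closes (i : Int) : Nat) : Int))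

-- ===== PRECONDITION & SPEC =====
def Spec_compute_depth_profile (structure_ : String) (out : List Int) : Prop := out = compute_depth_profile_alt structure_
instance (structure_ : String) (out : List Int) : Decidable (Spec_compute_depth_profile structure_ out) := by unfold Spec_compute_depth_profile; infer_instance

-- ===== CLAIM (what is proved, stated in full; the proofs are below) =====
def Claim_equal_compute_depth_profile : Prop := ∀ (structure_ : String), Dom_compute_depth_profile structure_ → Spec_compute_depth_profile structure_ (compute_depth_profile structure_)

-- ===== LEMMAS AND PROOFS =====

-- count of '(' minus count of ')' — A's depth after a prefix
def pvCnt (l : List Char) : Int :=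
  ((l.countP (fun c => decide (c = '('))) : Int) - ((l.countP (fun c => decide (c = ')'))) : Int)

-- A's fold produces the prefix-count profile
theorem pv_foldA (l : List Char) (d : Int) (p : List Int) :
    (l.foldl
      (fun (st : Int × List Int) c =>
        let depth := if c = '(' then st.1 + 1 else if c = ')' then st.1 - 1 else st.1
        (depth, st.2 ++ [depth]))
      (d, p)).2 = p ++ (List.range l.length).map (fun i => d + pvCnt (l.take (i+1))) := by
  induction l generalizing d p with
  | nil => simp
  | cons c cs ih =>
    simp only [List.foldl]
    rw [ih]
    have hd : (if c = '(' then d + 1 else if c = ')' then d - 1 else d) = d + pvCnt [c] := by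
      unfold pvCnt; split_ifs with h1 h2 <;> simp [*] <;> omega
    have hrange : List.range (cs.length + 1) = 0 :: (List.range cs.length).map Nat.succ :=
      List.range_succ_eq_map
    simp only [List.length_cons, hrange, List.map_cons, List.map_map, hd]
    rw [List.append_assoc]
    congr 1
    simp only [List.take, List.singleton_append, List.cons.injEq]
    constructor
    · simp [pvCnt]
    · apply List.map_congr_left
      intro i _
      simp [pvCnt, List.countP_cons] <;> split_ifs <;> omega

-- every position emitted from start k is ≥ k
theorem pv_pos_ge (t : Char) (l : List Char) : ∀ k, ∀ y ∈ pvPositions t k l, (k : Int) ≤ y := by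
  induction l with
  | nil => intro k y hy; simp [pvPositions] at hy
  | cons c cs ih =>
    intro k y hy
    by_cases h : c = t
    · simp only [pvPositions, if_pos h] at hy
      rcases List.mem_cons.mp hy with rfl | hy'
      · exact le_refl _
      · have := ih (k+1) y hy'; push_cast at this ⊢; omega
    · simp only [pvPositions, if_neg h] at hy
      have := ih (k+1) y hy; push_cast at this ⊢; omega

-- the prefix-count meaning of the position list
theorem pv_posCount (t : Char) (l : List Char) :
    ∀ k i : Nat, (pvPositions t k l).countP (fun y => decide (y ≤ (k : Int) + (i : Int)))
      = (l.take (i+1)).countP (fun c => decide (c = t)) := by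
  induction l with
  | nil => intro k i; simp [pvPositions]
  | cons c cs ih =>
    intro k i
    simp only [pvPositions]
    cases i with
    | zero =>
      have hzero : (pvPositions t (k+1) cs).countP (fun y => decide (y ≤ (k : Int) + ((0:Nat) : Int))) = 0 := by
        rw [List.countP_eq_zero]
        intro y hy
        have := pv_pos_ge t cs (k+1) y hy
        simp only [decide_eq_true_eq]
        push_cast at this ⊢; omega
      split_ifs with h
      · rw [List.countP_cons, hzero, List.take_succ_cons]
        simp [h]
      · rw [hzero, List.take_succ_cons]
        simp [h]
    | succ j =>
      have hcast : ∀ y : Int, decide (y ≤ (k : Int) + (((j+1):Nat) : Int))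
          = decide (y ≤ (((k+1):Nat) : Int) + ((j:Nat) : Int)) := by
        intro y; congr 1; push_cast; ring
      have hrec : (pvPositions t (k+1) cs).countP (fun y => decide (y ≤ (k : Int) + (((j+1):Nat) : Int)))
          = (cs.take (j+1)).countP (fun c => decide (c = t)) := by
        rw [← ih (k+1) j]
        exact List.countP_congr (fun y _ => by rw [hcast y])
      split_ifs with h
      · rw [List.countP_cons, hrec, List.take_succ_cons, List.countP_cons]
        simp [h] <;> omega
      · rw [hrec, List.take_succ_cons, List.countP_cons]
        simp [h]

-- if all indices below m satisfy the predicate and none at or above m do, countP = m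
theorem pv_countP_threshold (xs : List Int) (x : Int) (m : Nat)
    (hm : m ≤ xs.length)
    (h1 : ∀ j, j < m → xs.getD j 0 ≤ x)
    (h2 : ∀ j, m ≤ j → j < xs.length → ¬ xs.getD j 0 ≤ x) :
    xs.countP (fun y => decide (y ≤ x)) = m := by
  have hgetD : ∀ j (hj : j < xs.length), xs.getD j 0 = xs[j]'hj := by
    intro j hj
    rw [List.getD_eq_getElem?_getD, List.getElem?_eq_getElem hj]
    rfl
  rw [← List.take_append_drop m xs, List.countP_append]
  have htake : (xs.take m).countP (fun y => decide (y ≤ x)) = (xs.take m).length := by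
    rw [List.countP_eq_length]
    intro y hy
    obtain ⟨j, hj, hval⟩ := List.getElem_of_mem hy
    have hjm : j < m := by
      have h' := hj; rw [List.length_take] at h'
      exact lt_of_lt_of_le h' (min_le_left _ _)
    have hjx : j < xs.length := by omega
    have : xs[j]'hjx = y := by rw [← hval]; simp [List.getElem_take]
    simp only [decide_eq_true_eq]
    rw [← this, ← hgetD j hjx]
    exact h1 j hjm
  have hdrop : (xs.drop m).countP (fun y => decide (y ≤ x)) = 0 := by
    rw [List.countP_eq_zero]
    intro y hy
    obtain ⟨j, hj, hval⟩ := List.getElem_of_mem hy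
    simp only [List.length_drop] at hj
    have hx : m + j < xs.length := by omega
    have : xs[m+j]'hx = y := by rw [← hval]; simp [List.getElem_drop]
    simp only [decide_eq_true_eq]
    rw [← this, ← hgetD (m+j) hx]
    exact h2 (m+j) (by omega) hx
  rw [htake, hdrop, List.length_take]
  omega

-- the binary-search loop, with the classic invariant, computes the ≤-count on a monotone list
theorem pv_bisect_loop (xs : List Int) (x : Int)
    (hmono : ∀ i j, i ≤ j → j < xs.length → xs.getD i 0 ≤ xs.getD j 0) :
    ∀ n lo hi, hi - lo ≤ n → lo ≤ hi → hi ≤ xs.length →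
    (∀ j, j < lo → xs.getD j 0 ≤ x) →
    (∀ j, hi ≤ j → j < xs.length → ¬ xs.getD j 0 ≤ x) →
    pvBisectLoop xs x lo hi = xs.countP (fun y => decide (y ≤ x)) := by
  intro n
  induction n with
  | zero =>
    intro lo hi hn hle hlen h1 h2
    have : lo = hi := by omega
    subst this
    rw [pvBisectLoop, if_neg (lt_irrefl lo)]
    exact (pv_countP_threshold xs x lo (by omega) h1 h2).symm
  | succ n ih =>
    intro lo hi hn hle hlen h1 h2
    rw [pvBisectLoop]
    by_cases hlh : lo < hi
    · rw [if_pos hlh]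
      show (if xs.getD ((lo+hi)/2) 0 ≤ x then pvBisectLoop xs x ((lo+hi)/2+1) hi
            else pvBisectLoop xs x lo ((lo+hi)/2)) = _
      have hm1 : lo ≤ (lo+hi)/2 := by omega
      have hm2 : (lo+hi)/2 < hi := by omega
      by_cases hc : xs.getD ((lo+hi)/2) 0 ≤ x
      · rw [if_pos hc]
        exact ih ((lo+hi)/2+1) hi (by omega) (by omega) hlen
          (fun j hj => le_trans (hmono j ((lo+hi)/2) (by omega) (by omega)) hc)
          h2
      · rw [if_neg hc]
        exact ih lo ((lo+hi)/2) (by omega) (by omega) (by omega) h1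
          (fun j hj hjl hle' => hc (le_trans (hmono ((lo+hi)/2) j hj hjl) hle'))
    · rw [if_neg hlh]
      have : lo = hi := by omega
      subst this
      exact (pv_countP_threshold xs x lo (by omega) h1 h2).symm

-- the position list is strictly increasing
theorem pv_pos_pairwise (t : Char) (l : List Char) : ∀ k, (pvPositions t k l).Pairwise (· < ·) := by
  induction l with
  | nil => intro k; simp [pvPositions]
  | cons c cs ih =>
    intro k
    simp only [pvPositions]
    split_ifs with h
    · refine List.Pairwise.cons ?_ (ih (k+1))
      intro y hy
      have := pv_pos_ge t cs (k+1) y hy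
      push_cast at this ⊢; omega
    · exact ih (k+1)

theorem pv_pairwise_mono (xs : List Int) (hp : xs.Pairwise (· < ·)) :
    ∀ i j, i ≤ j → j < xs.length → xs.getD i 0 ≤ xs.getD j 0 := by
  intro i j hij hj
  have hi : i < xs.length := by omega
  rw [List.getD_eq_getElem?_getD, List.getD_eq_getElem?_getD,
      List.getElem?_eq_getElem hi, List.getElem?_eq_getElem hj]
  simp only [Option.getD_some]
  rcases Nat.lt_or_ge i j with h | h
  · exact le_of_lt ((List.pairwise_iff_getElem.mp hp) i j hi hj h)
  · have : i = j := by omega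
    subst this; exact le_rfl

-- bisect_right on a position list = prefix character count
theorem pv_bisect_pos (t : Char) (l : List Char) (i : Nat) :
    pvBisectRight (pvPositions t 0 l) (i : Int) = (l.take (i+1)).countP (fun c => decide (c = t)) := by
  unfold pvBisectRight
  rw [pv_bisect_loop (pvPositions t 0 l) (i : Int)
        (pv_pairwise_mono _ (pv_pos_pairwise t l 0)) (pvPositions t 0 l).length 0
        (pvPositions t 0 l).length (by omega) (by omega) (le_refl _)
        (fun j hj => absurd hj (by omega))
        (fun j hj hjl => absurd (lt_of_le_of_lt hj hjl) (lt_irrefl _))]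
  have := pv_posCount t l 0 i
  simpa using this

-- ===== VERDICT (by name: the statement is the Claim_ definition above) =====
theorem compute_depth_profile_spec : Claim_equal_compute_depth_profile := by
  intro s _
  unfold Spec_compute_depth_profile compute_depth_profile compute_depth_profile_alt
  rw [pv_foldA s.toList 0 []]
  simp only [List.nil_append]
  apply List.map_congr_left
  intro i hi
  rw [pv_bisect_pos '(' s.toList i, pv_bisect_pos ')' s.toList i]
  unfold pvCnt
  omega
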